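-- pv_equiv track=rewrite | github.com/ahmadi-ux/Depression-detector | backend/unified_engine.py | determine_overall_classification
-- ===== SOURCE A (Python) =====
-- def determine_overall_classification(classifications: list) -> str:
--     """
--     Determine overall classification from multiple file results.
--     If any file is 'depressed', overall is 'depressed'
--     """
--     if not classifications:
--         return 'unknown'
--
--     # If any result is depressed, overall is depressed
--     if 'depressed' in classifications:
--         return 'depressed'
--
--     # If all are not-depressed, overall is not-depressed
--     if all(c == 'not-depressed' for c in classifications):
--         return 'not-depressed'
--
--     # Mixed or unknown
--     return 'depressed' if 'unknown' not in classifications else 'unknown'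
-- ===== SOURCE B (Python) =====
-- _RANK = {'not-depressed': 0, 'unknown': 2, 'depressed': 3}
-- _VERDICT = ('not-depressed', 'depressed', 'unknown', 'depressed')
--
-- def determine_overall_classification(classifications: list) -> str:
--     if not classifications:
--         return 'unknown'
--     return _VERDICT[max(_RANK.get(c, 1) for c in classifications)]
-- ===== Notes on version B (the rewrite author's own statement) =====
-- stated objective: alternative
-- what changed: Replaces A's cascade of membership/all scans and priority branches with a severity lattice: each label is mapped to a numeric rank (not-depressed=0, other=1, unknown=2, depressed=3), the maximum rank is taken, and the answer is read from a verdict lookup table.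
import Mathlib
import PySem

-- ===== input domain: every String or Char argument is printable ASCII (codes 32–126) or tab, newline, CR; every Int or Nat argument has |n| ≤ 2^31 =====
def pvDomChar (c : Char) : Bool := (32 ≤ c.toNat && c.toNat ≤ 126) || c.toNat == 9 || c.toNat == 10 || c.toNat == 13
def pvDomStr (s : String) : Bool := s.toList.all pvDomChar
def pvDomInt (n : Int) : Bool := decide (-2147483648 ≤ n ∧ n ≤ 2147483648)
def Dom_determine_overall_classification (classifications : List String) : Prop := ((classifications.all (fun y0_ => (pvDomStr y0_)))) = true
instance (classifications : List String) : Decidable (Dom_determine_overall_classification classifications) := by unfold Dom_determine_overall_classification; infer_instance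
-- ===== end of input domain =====

-- B replaces A's cascade of scans/branches with a severity-rank maximum plus a verdict lookup table (objective: alternative).

-- ===== PORT A =====
def determine_overall_classification (classifications : List String) : String :=
  if classifications = [] then "unknown"
  else if classifications.contains "depressed" then "depressed"
  else if classifications.all (fun c => c == "not-depressed") then "not-depressed"
  else if !(classifications.contains "unknown") then "depressed" else "unknown"

-- ===== PORT B =====
-- Source B's _RANK.get(c, 1): exact-key lookup in the 3-entry dict, default 1
def pvRankB (c : String) : Nat :=
  if c = "not-depressed" then 0 else if c = "unknown" then 2 else if c = "depressed" then 3 else 1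

-- Source B's _VERDICT[i] tuple indexing (i is max of ranks, hence ≤ 3)
def pvVerdictB (i : Nat) : String :=
  match i with
  | 0 => "not-depressed"
  | 1 => "depressed"
  | 2 => "unknown"
  | _ => "depressed"

def determine_overall_classification_alt (classifications : List String) : String :=
  if classifications = [] then "unknown"
  else pvVerdictB ((classifications.map pvRankB).foldl max 0)

-- ===== PRECONDITION & SPEC =====
def Spec_determine_overall_classification (classifications : List String) (out : String) : Prop := out = determine_overall_classification_alt classifications
instance (classifications : List String) (out : String) : Decidable (Spec_determine_overall_classification classifications out) := by unfold Spec_determine_overall_classification; infer_instance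

-- ===== CLAIM (what is proved, stated in full; the proofs are below) =====
def Claim_equal_determine_overall_classification : Prop := ∀ (classifications : List String), Dom_determine_overall_classification classifications → Spec_determine_overall_classification classifications (determine_overall_classification classifications)

-- ===== LEMMAS AND PROOFS =====

theorem pvRankB_le (c : String) : pvRankB c ≤ 3 := by
  unfold pvRankB; split_ifs <;> omega

theorem pv_foldmax_acc (cs : List String) : ∀ a : Nat,
    cs.foldl (fun m c => max m (pvRankB c)) a
      = max a (cs.foldl (fun m c => max m (pvRankB c)) 0) := by
  induction cs with
  | nil => intro a; simp
  | cons h t ih =>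
    intro a
    simp only [List.foldl_cons]
    rw [ih (max a (pvRankB h)), ih (max 0 (pvRankB h))]
    omega

theorem pv_three_le (cs : List String) :
    3 ≤ cs.foldl (fun m c => max m (pvRankB c)) 0 ↔ "depressed" ∈ cs := by
  induction cs with
  | nil => simp
  | cons h t ih =>
    simp only [List.foldl_cons, List.mem_cons]
    rw [pv_foldmax_acc t (max 0 (pvRankB h))]
    constructor
    · intro hle
      by_cases hh : 3 ≤ pvRankB h
      · left
        have := pvRankB_le h
        unfold pvRankB at hh
        split_ifs at hh with h1 h2 h3 <;> first | omega | exact h3.symm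
      · right
        apply ih.mp
        omega
    · rintro (rfl | hm)
      · have h3 : pvRankB "depressed" = 3 := by decide
        omega
      · have := ih.mpr hm; omega

theorem pv_zero_iff (cs : List String) :
    cs.foldl (fun m c => max m (pvRankB c)) 0 = 0 ↔ ∀ c ∈ cs, c = "not-depressed" := by
  induction cs with
  | nil => simp
  | cons h t ih =>
    simp only [List.foldl_cons, List.mem_cons]
    rw [pv_foldmax_acc t (max 0 (pvRankB h))]
    constructor
    · intro h0
      have h1 : pvRankB h = 0 := by omega
      have h2 : t.foldl (fun m c => max m (pvRankB c)) 0 = 0 := by omega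
      have hh : h = "not-depressed" := by
        unfold pvRankB at h1; split_ifs at h1 <;> first | assumption | omega
      intro c hc
      rcases hc with rfl | hc
      · exact hh
      · exact ih.mp h2 c hc
    · intro hall
      have hh : pvRankB h = 0 := by
        rw [hall h (Or.inl rfl)]; rfl
      have ht : t.foldl (fun m c => max m (pvRankB c)) 0 = 0 :=
        ih.mpr (fun c hc => hall c (Or.inr hc))
      omega

theorem pv_two_le (cs : List String) :
    2 ≤ cs.foldl (fun m c => max m (pvRankB c)) 0 ↔
      ∃ c ∈ cs, c = "depressed" ∨ c = "unknown" := by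
  induction cs with
  | nil => simp
  | cons h t ih =>
    simp only [List.foldl_cons, List.mem_cons]
    rw [pv_foldmax_acc t (max 0 (pvRankB h))]
    constructor
    · intro hle
      by_cases hh : 2 ≤ pvRankB h
      · refine ⟨h, Or.inl rfl, ?_⟩
        unfold pvRankB at hh
        split_ifs at hh <;> first | omega | simp_all
      · obtain ⟨c, hc, hv⟩ := ih.mp (by omega)
        exact ⟨c, Or.inr hc, hv⟩
    · rintro ⟨c, (rfl | hc), hv⟩
      · rcases hv with rfl | rfl <;> simp [pvRankB]
      · have := ih.mpr ⟨c, hc, hv⟩; omega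

theorem pv_fold_le_three (cs : List String) :
    cs.foldl (fun m c => max m (pvRankB c)) 0 ≤ 3 := by
  induction cs with
  | nil => simp
  | cons h t ih =>
    simp only [List.foldl_cons]
    rw [pv_foldmax_acc t (max 0 (pvRankB h))]
    have := pvRankB_le h
    omega

-- ===== VERDICT (by name: the statement is the Claim_ definition above) =====
theorem determine_overall_classification_spec : Claim_equal_determine_overall_classification := by
  intro cs _
  unfold Spec_determine_overall_classification determine_overall_classification determine_overall_classification_alt
  by_cases hnil : cs = []
  · simp [hnil]
  · simp only [hnil, if_false, List.foldl_map]
    set M := cs.foldl (fun m c => max m (pvRankB c)) 0 with hM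
    have hMle : M ≤ 3 := pv_fold_le_three cs
    by_cases hd : "depressed" ∈ cs
    · have h3 : M = 3 := by have := (pv_three_le cs).mpr hd; omega
      simp [hd, h3, pvVerdictB]
    · have h3 : ¬ 3 ≤ M := fun h => hd ((pv_three_le cs).mp h)
      by_cases hall : ∀ x ∈ cs, x = "not-depressed"
      · have h0 : M = 0 := (pv_zero_iff cs).mpr hall
        have hallb : cs.all (fun c => c == "not-depressed") = true := by
          rw [List.all_eq_true]; intro c hc; simpa using hall c hc
        simp [hd, hallb, h0, pvVerdictB]
      · have h0 : M ≠ 0 := fun h => hall ((pv_zero_iff cs).mp h)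
        have hallb : cs.all (fun c => c == "not-depressed") = false := by
          rw [← Bool.not_eq_true, List.all_eq_true]; simpa using hall
        by_cases hu : "unknown" ∈ cs
        · have h2 : M = 2 := by
            have := (pv_two_le cs).mpr ⟨_, hu, Or.inr rfl⟩; omega
          simp [hd, hallb, hu, h2, pvVerdictB]
        · have h2 : ¬ 2 ≤ M := by
            intro h
            obtain ⟨c, hc, hv⟩ := (pv_two_le cs).mp h
            rcases hv with rfl | rfl <;> [exact hd hc; exact hu hc]
          have h1 : M = 1 := by omega
          simp [hd, hallb, hu, h1, pvVerdictB]
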